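-- pv_equiv track=rewrite | github.com/dqk0902/DSA_2025 | week4/collision.py | find_other
-- ===== SOURCE A (Python) =====
-- def hash_value(string):
--     A = 23
--     M = 2**32
--
--     result = 0
--     n = len(string)
--
--     for i, char in enumerate(string):
--         char_value = ord(char) - ord('a')
--
--         power = n - 1 - i
--
--         result += char_value * (A ** power)
--
--     return result % M
--
-- def find_other(string):
--     original_hash = hash_value(string)
--     target = original_hash + (1 << 32)
--
--     powers = []
--     current_power = 1
--     while current_power <= target:
--         powers.append(current_power)
--         next_power = current_power * 23
--         if next_power > target:
--             break
--         current_power = next_power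
--
--     powers = list(reversed(powers))
--
--     coefficients = []
--     remaining = target
--     for power in powers:
--         coeff = remaining // power
--         if coeff > 25:
--             coeff = 25
--         coefficients.append(coeff)
--         remaining -= coeff * power
--
--     collision_chars = [chr(coeff + ord('a')) for coeff in coefficients]
--     collision_str = ''.join(collision_chars)
--
--     if collision_str != string:
--         return collision_str
--     else:
--         return collision_str + 'a'
-- ===== SOURCE B (Python) =====
-- def find_other(string):
--     # Horner accumulation: one multiply per char instead of recomputing 23**power each step;
--     # the base-23 decomposition runs top-down on a single power variable instead of building a powers list.
--     M = 1 << 32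
--     h = 0
--     for ch in string:
--         h = h * 23 + ord(ch) - ord('a')
--     target = h % M + M
--
--     p = 1
--     while p * 23 <= target:
--         p *= 23
--
--     chars = []
--     rem = target
--     while p >= 1:
--         c = rem // p
--         if c > 25:
--             c = 25
--         chars.append(chr(c + ord('a')))
--         rem -= c * p
--         p //= 23
--
--     s = ''.join(chars)
--     return s if s != string else s + 'a'
-- ===== Notes on version B (the rewrite author's own statement) =====
-- stated objective: faster
-- what changed: The hash is accumulated by Horner's rule (one multiply-add per character) instead of recomputing 23**power for every character, and the base-23 decomposition walks a single power variable downward (p //= 23) instead of building, reversing and iterating a list of powers.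
import Mathlib
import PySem

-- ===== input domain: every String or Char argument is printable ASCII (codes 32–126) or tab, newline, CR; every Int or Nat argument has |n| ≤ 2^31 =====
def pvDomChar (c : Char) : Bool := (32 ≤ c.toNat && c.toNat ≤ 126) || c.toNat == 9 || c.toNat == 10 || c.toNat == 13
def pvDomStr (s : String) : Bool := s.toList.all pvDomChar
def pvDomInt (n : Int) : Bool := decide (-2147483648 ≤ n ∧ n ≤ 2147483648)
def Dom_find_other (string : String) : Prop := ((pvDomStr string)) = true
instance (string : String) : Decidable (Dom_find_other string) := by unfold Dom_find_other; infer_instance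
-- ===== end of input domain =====

-- B replaces A's per-character 23**power exponentiation by Horner's rule and the powers-list
-- construction by a single downward-walking power variable (objective: faster, asymptotic).

-- ===== PORT A =====
def hash_value (string : String) : Int :=
  let M : Int := 2 ^ 32
  let n : Int := PySem.Str.len string
  -- Python's power = n - 1 - i is ≥ 0 whenever the loop body runs, so the Int exponent is
  -- ported exactly via .toNat
  let result : Int := (PySem.List.enumerate string.toList 0).foldl
    (fun result ic =>
      let char_value : Int := (ic.2.toNat : Int) - 97
      result + char_value * (23 : Int) ^ (n - 1 - ic.1).toNat) 0
  PySem.Int.mod result M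

def powersLoop (target cur : Int) (hcur : 0 < cur) : List Int :=
  if _h1 : cur ≤ target then
    if _h2 : cur * 23 > target then [cur]
    else cur :: powersLoop target (cur * 23) (by positivity)
  else []
termination_by (target - cur).toNat
decreasing_by omega

def coeffStep (st : List Int × Int) (power : Int) : List Int × Int :=
  let coeff0 := PySem.Int.floordiv st.2 power
  let coeff := if coeff0 > 25 then 25 else coeff0
  (st.1 ++ [coeff], st.2 - coeff * power)

def find_other (string : String) : String :=
  let original_hash := hash_value string
  let target := original_hash + 2 ^ 32
  let powers := (powersLoop target 1 (by norm_num)).reverse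
  let coefficients := (powers.foldl coeffStep ([], target)).1
  let collision := coefficients.map (fun c => Char.ofNat (c + 97).toNat)
  if String.mk collision ≠ string then String.mk collision else String.mk (collision ++ ['a'])

-- ===== PORT B =====
def growLoop (target p : Int) (hp : 0 < p) : Int :=
  if p * 23 ≤ target then growLoop target (p * 23) (by positivity) else p
termination_by (target - p).toNat
decreasing_by omega

def emitLoop (rem p : Int) : List Char :=
  if h : 1 ≤ p then
    let c0 := PySem.Int.floordiv rem p
    let c := if c0 > 25 then 25 else c0
    Char.ofNat (c + 97).toNat :: emitLoop (rem - c * p) (PySem.Int.floordiv p 23)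
  else []
termination_by p.toNat
decreasing_by
  rw [PySem.Int.floordiv_eq_ediv_of_pos (by norm_num)]
  omega

def find_other_alt (string : String) : String :=
  let M : Int := 2 ^ 32
  let h := string.toList.foldl (fun h ch => h * 23 + (ch.toNat : Int) - 97) 0
  let target := PySem.Int.mod h M + M
  let p := growLoop target 1 (by norm_num)
  let chars := emitLoop target p
  if String.mk chars ≠ string then String.mk chars else String.mk (chars ++ ['a'])

-- ===== PRECONDITION & SPEC =====
def Spec_find_other (string : String) (out : String) : Prop := out = find_other_alt string
instance (string : String) (out : String) : Decidable (Spec_find_other string out) := by unfold Spec_find_other; infer_instance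

-- ===== CLAIM (what is proved, stated in full; the proofs are below) =====
def Claim_equal_find_other : Prop := ∀ (string : String), Dom_find_other string → Spec_find_other string (find_other string)

-- ===== LEMMAS AND PROOFS =====
def chVal (c : Char) : Int := (c.toNat : Int) - 97

def hsum : List Char → Int
  | [] => 0
  | c :: t => chVal c * (23 : Int) ^ t.length + hsum t

lemma horner_shift (l : List Char) (a : Int) :
    l.foldl (fun h ch => h * 23 + (ch.toNat : Int) - 97) a
      = a * (23 : Int) ^ l.length + l.foldl (fun h ch => h * 23 + (ch.toNat : Int) - 97) 0 := by
  induction l generalizing a with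
  | nil => simp
  | cons c t ih =>
    simp only [List.foldl_cons, List.length_cons]
    rw [ih (a * 23 + (c.toNat : Int) - 97), ih (0 * 23 + (c.toNat : Int) - 97)]
    ring

lemma horner_eq_hsum (l : List Char) :
    l.foldl (fun h ch => h * 23 + (ch.toNat : Int) - 97) 0 = hsum l := by
  induction l with
  | nil => simp [hsum]
  | cons c t ih =>
    simp only [List.foldl_cons]
    rw [horner_shift t (0 * 23 + (c.toNat : Int) - 97), ih, hsum]
    unfold chVal; ring

lemma enumA_fold (t : List Char) (k n acc : Int) (hk : 0 ≤ k) (hn : n = k + t.length) :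
    (PySem.List.enumerate t k).foldl
      (fun r ic => r + ((ic.2.toNat : Int) - 97) * (23 : Int) ^ (n - 1 - ic.1).toNat) acc
      = acc + hsum t := by
  induction t generalizing k acc with
  | nil => simp [PySem.List.enumerate_nil, hsum]
  | cons c t ih =>
    rw [PySem.List.enumerate_cons, List.foldl_cons]
    rw [ih (k + 1) _ (by omega) (by simp at hn ⊢; omega)]
    have hpow : (n - 1 - k).toNat = t.length := by
      simp at hn; omega
    rw [hpow, hsum]
    unfold chVal; ring

lemma fold_fst (ps : List Int) (cs : List Int) (rem : Int) :
    (ps.foldl coeffStep (cs, rem)).1 = cs ++ (ps.foldl coeffStep ([], rem)).1 := by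
  induction ps generalizing cs rem with
  | nil => simp
  | cons p ps ih =>
    simp only [List.foldl_cons, coeffStep]
    rw [ih, ih ([] ++ _)]
    simp

lemma pow_floordiv (k : Nat) :
    PySem.Int.floordiv ((23 : Int) ^ (k + 1)) 23 = (23 : Int) ^ k := by
  rw [PySem.Int.floordiv_eq_ediv_of_pos (by norm_num), pow_succ]
  exact Int.mul_ediv_cancel _ (by norm_num)

lemma emit_eq (k : Nat) (rem : Int) :
    emitLoop rem ((23 : Int) ^ k)
      = ((((List.range (k + 1)).map (fun i => (23 : Int) ^ i)).reverse.foldl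
          coeffStep ([], rem)).1).map (fun c => Char.ofNat (c + 97).toNat) := by
  induction k generalizing rem with
  | zero =>
    rw [emitLoop]
    simp only [pow_zero]
    rw [emitLoop]
    norm_num [coeffStep]
  | succ k ih =>
    rw [emitLoop]
    have hp : 1 ≤ (23 : Int) ^ (k + 1) := one_le_pow₀ (by norm_num)
    rw [dif_pos hp, pow_floordiv]
    simp only [ih]
    have hrev : (((List.range (k + 1 + 1)).map (fun i => (23 : Int) ^ i)).reverse)
        = (23 : Int) ^ (k + 1) :: ((List.range (k + 1)).map (fun i => (23 : Int) ^ i)).reverse := by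
      rw [List.range_succ, List.map_append, List.reverse_append]
      simp
    rw [hrev, List.foldl_cons]
    simp only [coeffStep]
    conv_rhs => rw [fold_fst]
    simp

lemma map_pow_range (j k : Nat) :
    (List.range (k + 1)).map (fun i => (23 : Int) ^ (j + i))
      = (23 : Int) ^ j :: (List.range k).map (fun i => (23 : Int) ^ (j + 1 + i)) := by
  rw [List.range_succ_eq_map, List.map_cons, List.map_map]
  simp only [List.cons.injEq]
  exact ⟨by norm_num, List.map_congr_left fun i _ => by
    simp only [Function.comp_apply]; congr 1; omega⟩

lemma loops_shape : ∀ (fuel : Nat) (target cur : Int) (h : 0 < cur) (j : Nat),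
    (target - cur).toNat < fuel → cur = (23 : Int) ^ j → cur ≤ target →
    ∃ k, (∀ h', powersLoop target cur h' = (List.range (k + 1)).map (fun i => (23 : Int) ^ (j + i))) ∧
         (∀ h', growLoop target cur h' = (23 : Int) ^ (j + k)) := by
  intro fuel
  induction fuel with
  | zero => intro target cur h j hf; omega
  | succ fuel ih =>
    intro target cur h j hf hcur hle
    by_cases h2 : cur * 23 ≤ target
    · have h22 : cur + 22 ≤ cur * 23 := by nlinarith
      obtain ⟨k, hP, hG⟩ := ih target (cur * 23) (by positivity) (j + 1)
        (by omega) (by rw [hcur, pow_succ]) h2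
      refine ⟨k + 1, fun h' => ?_, fun h' => ?_⟩
      · rw [powersLoop, dif_pos hle, dif_neg (by omega), hP _, map_pow_range j (k + 1), hcur]
      · rw [growLoop, if_pos h2, hG _]
        congr 1
        omega
    · refine ⟨0, fun h' => ?_, fun h' => ?_⟩
      · rw [powersLoop, dif_pos hle, dif_pos (by omega)]
        simp [hcur]
      · rw [growLoop, if_neg h2]
        simpa using hcur.symm ▸ rfl

-- ===== VERDICT (by name: the statement is the Claim_ definition above) =====
theorem find_other_spec : Claim_equal_find_other := by
  intro string _
  unfold Spec_find_other find_other find_other_alt hash_value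
  simp only [PySem.Str.len_eq]
  set l := string.toList with hl
  rw [enumA_fold l 0 (l.length : Int) 0 (by norm_num) (by simp), horner_eq_hsum]
  simp only [zero_add]
  set target : Int := PySem.Int.mod (hsum l) ((2 : Int) ^ 32) + 2 ^ 32 with ht
  have htpos : (1 : Int) ≤ target := by
    have := PySem.Int.mod_nonneg (hsum l) (b := (2 : Int) ^ 32) (by norm_num)
    rw [ht]; omega
  obtain ⟨k, hP, hG⟩ := loops_shape ((target - 1).toNat + 1) target 1 (by norm_num) 0
    (by omega) (by norm_num) htpos
  simp only [zero_add] at hP hG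
  rw [hP _, hG _, emit_eq k target]
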